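-- pv_equiv track=rewrite | github.com/wildwestrom/algo-final-project | priority_sorter/sorter.py | expected_max_comparisons
-- ===== SOURCE A (Python) =====
-- def expected_max_comparisons(n: int) -> int:
--     """Upper-bound used by the Rust tests, ported verbatim."""
--     if n <= 1:
--         return 0
--     total = 0
--     for k in range(1, n):
--         x = k + 1
--         ceil_log2 = (x - 1).bit_length()
--         total += ceil_log2
--     return total
-- ===== SOURCE B (Python) =====
-- def expected_max_comparisons(n: int) -> int:
--     """Closed form: sum_{k=1}^{m} bit_length(k) = b*(m+1) - 2^b + 1 with m = n-1, b = m.bit_length()."""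
--     m = n - 1
--     if m <= 0:
--         return 0
--     b = m.bit_length()
--     return b * (m + 1) - (1 << b) + 1
-- ===== Notes on version B (the rewrite author's own statement) =====
-- stated objective: faster
-- what changed: Replaces A's O(n) loop that adds bit_length(k) for every k in 1..n-1 with the closed form b*(m+1) - 2^b + 1 where m = n-1 and b = m.bit_length(), derived by summing bit_length over dyadic blocks.
import Mathlib
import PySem

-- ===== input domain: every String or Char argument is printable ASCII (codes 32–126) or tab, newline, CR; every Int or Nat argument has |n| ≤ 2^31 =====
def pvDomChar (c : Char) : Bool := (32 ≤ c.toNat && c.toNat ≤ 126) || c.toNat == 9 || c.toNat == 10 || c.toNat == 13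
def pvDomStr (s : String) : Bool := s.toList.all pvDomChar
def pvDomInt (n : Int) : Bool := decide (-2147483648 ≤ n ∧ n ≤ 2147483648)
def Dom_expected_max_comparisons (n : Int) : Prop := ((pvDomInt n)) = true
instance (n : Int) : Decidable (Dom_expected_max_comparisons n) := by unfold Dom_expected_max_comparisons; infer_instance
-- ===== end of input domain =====

-- B replaces A's O(n) loop summing bit-lengths by the closed form b*(m+1) - 2^b + 1 (m = n-1, b = m.bit_length()): asymptotically faster.


-- ===== PORT A =====
def expected_max_comparisons (n : Int) : Int :=
  if n ≤ 1 then 0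
  else
    (PySem.List.pyRange 1 n 1).foldl
      (fun total k =>
        let x := k + 1
        let ceil_log2 : Int := (PySem.Int.bitLength (x - 1) : Int)
        total + ceil_log2) 0

-- ===== PORT B =====
def expected_max_comparisons_alt (n : Int) : Int :=
  let m := n - 1
  if m ≤ 0 then 0
  else
    let b := PySem.Int.bitLength m
    (b : Int) * (m + 1) - 2 ^ b + 1

-- ===== PRECONDITION & SPEC =====
def Spec_expected_max_comparisons (n : Int) (out : Int) : Prop := out = expected_max_comparisons_alt n
instance (n : Int) (out : Int) : Decidable (Spec_expected_max_comparisons n out) := by unfold Spec_expected_max_comparisons; infer_instance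

-- ===== CLAIM (what is proved, stated in full; the proofs are below) =====
def Claim_equal_expected_max_comparisons : Prop := ∀ (n : Int), Dom_expected_max_comparisons n → Spec_expected_max_comparisons n (expected_max_comparisons n)

-- ===== LEMMAS AND PROOFS =====

-- Python's bit_length on a nonnegative int is Nat.size
theorem pv_size_div2 (m : Nat) (h : 0 < m) : Nat.size m = Nat.size (m / 2) + 1 := by
  apply le_antisymm
  · apply Nat.size_le.2
    have h1 : m / 2 < 2 ^ Nat.size (m / 2) := Nat.lt_size_self _
    have h2 : (2 : Nat) ^ (Nat.size (m / 2) + 1) = 2 ^ Nat.size (m / 2) * 2 := pow_succ 2 _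
    omega
  · apply Nat.succ_le_of_lt
    apply Nat.lt_size.2
    rcases Nat.eq_zero_or_pos (m / 2) with h0 | hp
    · rw [h0]; simpa using h
    · have hs : 0 < Nat.size (m / 2) := Nat.size_pos.2 hp
      have h1 : 2 ^ (Nat.size (m / 2) - 1) ≤ m / 2 := Nat.lt_size.1 (by omega)
      have h2 : (2 : Nat) ^ Nat.size (m / 2) = 2 ^ (Nat.size (m / 2) - 1) * 2 := by
        rw [← pow_succ]
        congr 1
        omega
      omega

-- Python's bit_length on a nonnegative int is Nat.size
theorem pv_bitLength_eq_size (m : Nat) : PySem.Int.bitLength (m : Int) = Nat.size m := by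
  induction m using Nat.strong_induction_on with
  | _ m ih =>
    rcases Nat.eq_zero_or_pos m with h0 | hpos
    · subst h0; simp [PySem.Int.bitLength_zero]
    · rw [PySem.Int.bitLength_natCast hpos, ih (m / 2) (Nat.div_lt_self hpos (by norm_num)),
        pv_size_div2 m hpos]

-- size (m+1) is size m if m+1 < 2^(size m), and size m + 1 if m+1 = 2^(size m)
theorem pv_size_succ_cases (m : Nat) (_hm : 0 < m) :
    (m + 1 < 2 ^ Nat.size m ∧ Nat.size (m + 1) = Nat.size m) ∨
    ((m + 1 : Nat) = 2 ^ Nat.size m ∧ Nat.size (m + 1) = Nat.size m + 1) := by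
  have hlt : m < 2 ^ Nat.size m := Nat.lt_size_self m
  rcases lt_or_eq_of_le (Nat.succ_le_of_lt hlt) with h | h
  · left
    refine ⟨h, le_antisymm (Nat.size_le.2 h) (Nat.size_le_size (Nat.le_succ m))⟩
  · right
    exact ⟨h, by rw [show m + 1 = 2 ^ Nat.size m from h, Nat.size_pow]⟩

-- the loop of A, as a function of the upper bound m : Nat (sum of bit lengths of 1..m)
theorem pv_fold_closed (m : Nat) (hm : 0 < m) :
    ((PySem.List.pyRange 1 ((m : Int) + 1) 1).foldl
      (fun total k =>
        let x := k + 1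
        let ceil_log2 : Int := (PySem.Int.bitLength (x - 1) : Int)
        total + ceil_log2) 0)
    = (Nat.size m : Int) * ((m : Int) + 1) - 2 ^ Nat.size m + 1 := by
  induction m with
  | zero => omega
  | succ m ih =>
    rw [PySem.List.pyRange_one_succ_right (by exact_mod_cast Nat.succ_le_of_lt (by exact_mod_cast hm)),
      List.foldl_append]
    push_cast
    rcases Nat.eq_zero_or_pos m with h0 | hpos
    · subst h0
      simp [PySem.List.pyRange_one_eq_nil]
      decide
    · rw [ih hpos]
      simp only [List.foldl_cons, List.foldl_nil]
      have hb : PySem.Int.bitLength ((m : Int) + 1 + 1 - 1) = Nat.size (m + 1) := by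
        have : ((m : Int) + 1 + 1 - 1) = ((m + 1 : Nat) : Int) := by push_cast; ring
        rw [this, pv_bitLength_eq_size]
      rw [hb]
      rcases pv_size_succ_cases m hpos with ⟨_, heq⟩ | ⟨hpow, heq⟩
      · rw [heq]; ring
      · rw [heq]
        have hpowZ : ((m : Int) + 1) = 2 ^ Nat.size m := by exact_mod_cast hpow
        rw [pow_succ]
        push_cast
        rw [← hpowZ]
        ring

-- ===== VERDICT (by name: the statement is the Claim_ definition above) =====
theorem expected_max_comparisons_spec : Claim_equal_expected_max_comparisons := by
  intro n _
  unfold Spec_expected_max_comparisons expected_max_comparisons expected_max_comparisons_alt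
  by_cases h : n ≤ 1
  · simp only [if_pos h, if_pos (by omega : n - 1 ≤ 0)]
  · have h2 : (2 : Int) ≤ n := by omega
    simp only [if_neg h, if_neg (by omega : ¬ n - 1 ≤ 0)]
    have hm : 0 < (n - 1).toNat := by omega
    have hn : n = ((n - 1).toNat : Int) + 1 := by omega
    rw [hn, pv_fold_closed _ hm]
    simp only [add_sub_cancel_right]
    rw [pv_bitLength_eq_size]
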